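-- pv_equiv track=rewrite | github.com/ni3ol/twitter-feed | src/main.py | get_simulation
-- ===== SOURCE A (Python) =====
-- def format_tweet(tweet):
--     '''Format tweet.
--     '''
--     return '@{}: {}'.format(tweet[0], tweet[1])
--
-- def get_simulation(users, user_followers_mapping, tweets):
--     '''Return ordered users and their tweets.
--     '''
--     simulation = []
--     for user in sorted(users):
--         simulation.append(user)
--         try:
--             followers = user_followers_mapping[user]
--         except:
--             followers = set()
--         for tweet in tweets:
--             if tweet[0] == user or tweet[0] in followers:
--                 simulation.append(format_tweet(tweet))
--     return simulation
-- ===== SOURCE B (Python) =====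
-- def format_tweet(tweet):
--     '''Format tweet.'''
--     return '@{}: {}'.format(tweet[0], tweet[1])
--
-- def get_simulation(users, user_followers_mapping, tweets):
--     '''Return ordered users and their tweets, using a per-author tweet index.'''
--     by_author = {}
--     for i, tweet in enumerate(tweets):
--         by_author.setdefault(tweet[0], []).append((i, format_tweet(tweet)))
--     simulation = []
--     for user in sorted(users):
--         simulation.append(user)
--         followers = user_followers_mapping.get(user, [])
--         authors = {user}
--         authors.update(followers)
--         entries = []
--         for a in authors:
--             entries.extend(by_author.get(a, []))
--         entries.sort(key=lambda e: e[0])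
--         simulation.extend(text for _, text in entries)
--     return simulation
-- ===== Notes on version B (the rewrite author's own statement) =====
-- stated objective: faster
-- what changed: B builds a per-author index of formatted tweets once and, for each sorted user, concatenates only the buckets of the user and their followers and re-merges them by tweet position, instead of A's rescan of the whole tweet list for every user.
import Mathlib
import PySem

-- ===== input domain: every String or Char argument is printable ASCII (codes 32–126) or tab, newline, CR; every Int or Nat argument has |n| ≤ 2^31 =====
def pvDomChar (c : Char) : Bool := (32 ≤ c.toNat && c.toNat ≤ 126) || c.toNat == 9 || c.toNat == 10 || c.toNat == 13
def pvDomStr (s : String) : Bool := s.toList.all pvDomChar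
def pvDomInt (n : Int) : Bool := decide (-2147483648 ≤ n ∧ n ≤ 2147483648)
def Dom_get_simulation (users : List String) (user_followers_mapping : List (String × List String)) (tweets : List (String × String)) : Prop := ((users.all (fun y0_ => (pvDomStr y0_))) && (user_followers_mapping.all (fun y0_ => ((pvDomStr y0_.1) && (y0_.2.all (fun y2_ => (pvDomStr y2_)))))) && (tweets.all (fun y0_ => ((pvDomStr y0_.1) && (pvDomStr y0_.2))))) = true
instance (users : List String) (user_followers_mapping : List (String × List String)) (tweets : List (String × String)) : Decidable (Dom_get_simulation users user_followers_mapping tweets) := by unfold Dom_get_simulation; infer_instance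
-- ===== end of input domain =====

-- B indexes the tweets by author once and, per user, gathers only the relevant authors'
-- buckets and re-merges them by tweet position, instead of A's per-user scan of ALL tweets
-- (objective: faster when users/followers touch few of the tweets).

-- ===== PORT A =====
-- format_tweet (shared module helper): '@{}: {}'.format(tweet[0], tweet[1])
def pvFormatTweet (t : String × String) : String := "@" ++ t.1 ++ ": " ++ t.2

def get_simulation (users : List String) (user_followers_mapping : List (String × List String)) (tweets : List (String × String)) : List String :=
  (PySem.List.sorted users (fun u => u)).foldl
    (fun simulation user =>
      -- try: followers = mapping[user]  except: followers = set()  (empty; only membership-tested below)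
      let followers : List String :=
        match (PySem.Dict.mk user_followers_mapping).get? user with
        | some f => f
        | none => []
      tweets.foldl
        (fun simulation tweet =>
          if tweet.1 == user || followers.contains tweet.1
          then simulation ++ [pvFormatTweet tweet]
          else simulation)
        (simulation ++ [user]))
    []

-- ===== PORT B =====
-- by_author = {}; for i, tweet in enumerate(tweets): by_author.setdefault(tweet[0], []).append((i, format_tweet(tweet)))
def pvByAuthor (tweets : List (String × String)) : PySem.Dict String (List (Int × String)) :=
  (PySem.List.enumerate tweets 0).foldl
    (fun d p => d.modify p.2.1 [] (· ++ [(p.1, pvFormatTweet p.2)]))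
    PySem.Dict.empty

def get_simulation_alt (users : List String) (user_followers_mapping : List (String × List String)) (tweets : List (String × String)) : List String :=
  let byAuthor := pvByAuthor tweets
  (PySem.List.sorted users (fun u => u)).foldl
    (fun simulation user =>
      let followers : List String := (PySem.Dict.mk user_followers_mapping).getD user []
      let authors : PySem.Set String := PySem.Set.update (PySem.Set.add PySem.Set.empty user) followers
      let entries : List (Int × String) :=
        authors.foldl (fun acc a => acc ++ byAuthor.getD a []) []
      simulation ++ [user] ++ (PySem.List.sorted entries (fun e => e.1)).map (·.2))
    []

-- ===== PRECONDITION & SPEC =====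
def Spec_get_simulation (users : List String) (user_followers_mapping : List (String × List String)) (tweets : List (String × String)) (out : List String) : Prop := out = get_simulation_alt users user_followers_mapping tweets
instance (users : List String) (user_followers_mapping : List (String × List String)) (tweets : List (String × String)) (out : List String) : Decidable (Spec_get_simulation users user_followers_mapping tweets out) := by unfold Spec_get_simulation; infer_instance

-- ===== CLAIM (what is proved, stated in full; the proofs are below) =====
def Claim_equal_get_simulation : Prop := ∀ (users : List String) (user_followers_mapping : List (String × List String)) (tweets : List (String × String)), Dom_get_simulation users user_followers_mapping tweets → Spec_get_simulation users user_followers_mapping tweets (get_simulation users user_followers_mapping tweets)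

-- ===== LEMMAS AND PROOFS =====

-- B's author→(index, formatted tweet) buckets, characterised as a filter of the enumeration.
theorem pvByAuthor_getD (tweets : List (String × String)) (a : String) :
    (pvByAuthor tweets).getD a []
      = ((PySem.List.enumerate tweets 0).filter (fun p => p.2.1 == a)).map
          (fun p => (p.1, pvFormatTweet p.2)) := by
  unfold pvByAuthor
  rw [← List.foldl_map (f := fun (p : Int × String × String) => (p.2.1, (p.1, pvFormatTweet p.2)))
        (g := fun (d : PySem.Dict String (List (Int × String))) q => d.modify q.1 [] (· ++ [q.2]))]
  rw [PySem.Dict.getD_foldl_modify_append]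
  simp [List.filter_map, Function.comp_def]

-- concatenating filters for two disjoint predicates is a permutation of the disjunction filter
theorem pv_filter_append_perm {β : Type} (L : List β) (p q : β → Bool)
    (h : ∀ x, p x = true → q x = false) :
    (L.filter p ++ L.filter q).Perm (L.filter (fun x => p x || q x)) := by
  induction L with
  | nil => simp
  | cons x t ih =>
      by_cases hp : p x = true
      · have hq := h x hp
        simp [hp, hq]
        exact ih
      · simp at hp
        by_cases hq : q x = true
        · simp [hp, hq]
          exact (List.perm_middle).trans (ih.cons x)
        · simp at hq
          simp [hp, hq]
          exact ih

-- gathering per-author buckets over a duplicate-free author list permutes the membership filter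
theorem pv_flatMap_filter_perm {β : Type} (authors : List String) (hnd : authors.Nodup)
    (L : List β) (key : β → String) :
    (authors.flatMap (fun a => L.filter (fun x => key x == a))).Perm
      (L.filter (fun x => decide (key x ∈ authors))) := by
  induction authors with
  | nil => simp
  | cons a rest ih =>
      have hna : a ∉ rest := (List.nodup_cons.mp hnd).1
      have ihr := ih (List.nodup_cons.mp hnd).2
      have hdisj : ∀ x, (key x == a) = true → decide (key x ∈ rest) = false := by
        intro x hx
        simp at hx
        simp [hx, hna]
      have h1 : List.flatMap (fun a => L.filter (fun x => key x == a)) (a :: rest)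
          = L.filter (fun x => key x == a)
              ++ rest.flatMap (fun a => L.filter (fun x => key x == a)) := by
        simp [List.flatMap_cons]
      have h3 := pv_filter_append_perm L (fun x => key x == a)
        (fun x => decide (key x ∈ rest)) hdisj
      have h4 : L.filter (fun x => (key x == a) || decide (key x ∈ rest))
          = L.filter (fun x => decide (key x ∈ a :: rest)) := by
        apply List.filter_congr
        intro x _
        by_cases hxa : key x = a <;> simp [hxa]
      rw [h1, ← h4]
      exact ((List.Perm.refl _).append ihr).trans h3

-- one user's block: A's scan over all tweets = B's gather-buckets-then-merge-by-index
theorem pv_step_eq (user_followers_mapping : List (String × List String))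
    (tweets : List (String × String)) (simulation : List String) (user : String) :
    (tweets.foldl
        (fun simulation tweet =>
          if tweet.1 == user
              || (match (PySem.Dict.mk user_followers_mapping).get? user with
                  | some f => f
                  | none => []).contains tweet.1
          then simulation ++ [pvFormatTweet tweet]
          else simulation)
        (simulation ++ [user]))
      = simulation ++ [user]
          ++ (PySem.List.sorted
                ((PySem.Set.update (PySem.Set.add PySem.Set.empty user)
                    ((PySem.Dict.mk user_followers_mapping).getD user [])).foldl
                  (fun acc a => acc ++ (pvByAuthor tweets).getD a []) [])
                (fun e => e.1)).map (·.2) := by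
  set followers : List String := (PySem.Dict.mk user_followers_mapping).getD user [] with hfol
  have hmatch : (match (PySem.Dict.mk user_followers_mapping).get? user with
      | some f => f | none => []) = followers := by
    rw [hfol, PySem.Dict.getD_eq_get?_getD]
    cases (PySem.Dict.mk user_followers_mapping).get? user <;> rfl
  rw [hmatch]
  set authors : PySem.Set String := PySem.Set.update (PySem.Set.add PySem.Set.empty user) followers with hauth
  have hmemA : ∀ x : String, x ∈ authors ↔ x = user ∨ x ∈ followers := by
    intro x
    rw [hauth, PySem.Set.mem_update]
    constructor
    · rintro (hx | hx)
      · left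
        rcases PySem.Set.mem_add PySem.Set.empty user x |>.mp hx with h | h
        · simp [PySem.Set.empty] at h
        · exact h
      · right; exact hx
    · rintro (hx | hx)
      · exact Or.inl ((PySem.Set.mem_add _ _ _).mpr (Or.inr hx))
      · exact Or.inr hx
  have hnd : authors.Nodup := by
    rw [hauth]
    apply PySem.Set.nodup_update
    apply PySem.Set.nodup_add
    simp [PySem.Set.empty]
  -- predicate on enumerated tweets
  set pred : String × String → Bool := fun t => t.1 == user || followers.contains t.1 with hpred
  -- A side
  rw [PySem.List.foldl_append_if pred pvFormatTweet tweets (simulation ++ [user])]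
  -- B side: the gathered entries
  have hentries : (authors.foldl (fun acc a => acc ++ (pvByAuthor tweets).getD a []) [])
      = (authors.flatMap (fun a => (PySem.List.enumerate tweets 0).filter (fun p => p.2.1 == a))).map
          (fun p => (p.1, pvFormatTweet p.2)) := by
    rw [PySem.List.foldl_append_eq_flatMap (fun a => (pvByAuthor tweets).getD a []) authors []]
    simp only [List.nil_append, pvByAuthor_getD]
    rw [List.map_flatMap]
  rw [hentries]
  -- permutation to the index-ordered filter of the enumeration
  have hperm0 := pv_flatMap_filter_perm authors hnd (PySem.List.enumerate tweets 0) (fun p => p.2.1)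
  have hfc : (PySem.List.enumerate tweets 0).filter (fun p => decide (p.2.1 ∈ authors))
      = (PySem.List.enumerate tweets 0).filter (fun p => pred p.2) := by
    apply List.filter_congr
    intro p _
    rw [hpred]
    by_cases hx : p.2.1 = user
    · simp [hx, hmemA]
    · by_cases hf : p.2.1 ∈ followers <;> simp [hx, hf, hmemA]
  rw [hfc] at hperm0
  set target : List (Int × String) :=
    ((PySem.List.enumerate tweets 0).filter (fun p => pred p.2)).map
      (fun p => (p.1, pvFormatTweet p.2)) with htarget
  have hperm : target.Perm
      ((authors.flatMap (fun a => (PySem.List.enumerate tweets 0).filter (fun p => p.2.1 == a))).map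
        (fun p => (p.1, pvFormatTweet p.2))) := (hperm0.map _).symm
  have hpw : target.Pairwise (fun a b => a.1 < b.1) := by
    rw [htarget, List.pairwise_map]
    exact (PySem.List.pairwise_lt_enumerate tweets 0).filter _
  rw [PySem.List.sorted_eq_of_perm_of_pairwise_lt _ target (fun e => e.1) hperm hpw]
  -- both sides are now the filtered, formatted tweets in original order
  rw [htarget, List.map_map]
  have : ((PySem.List.enumerate tweets 0).filter (fun p => pred p.2)).map
        ((fun e : Int × String => e.2) ∘ fun p : Int × String × String => (p.1, pvFormatTweet p.2))
      = (tweets.filter pred).map pvFormatTweet := by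
    conv_rhs => rw [← PySem.List.map_snd_enumerate tweets 0, List.filter_map, List.map_map]
    rfl
  rw [this, List.append_assoc]

-- ===== VERDICT (by name: the statement is the Claim_ definition above) =====
theorem get_simulation_spec : Claim_equal_get_simulation := by
  intro users user_followers_mapping tweets _
  unfold Spec_get_simulation get_simulation get_simulation_alt
  congr 1
  funext simulation user
  exact pv_step_eq user_followers_mapping tweets simulation user
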